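-- pv_equiv track=rewrite | github.com/djmaity/md-davis | md_davis/plotting/collect_data.py | get_ss_chain_slices
-- ===== SOURCE A (Python) =====
-- import string
--
-- def get_ss_chain_slices(secondary_structure):
--     slices = {}
--     prev = 0
--     last = len(secondary_structure)
--     chain = iter(string.ascii_uppercase)
--     for current, counter in enumerate(secondary_structure):
--         if '=' in counter:
--             slices[next(chain)] = (prev, current)
--             prev = current + 1
--     slices[next(chain)] = (prev, last)
--     return slices
-- ===== SOURCE B (Python) =====
-- import string
--
-- def get_ss_chain_slices(secondary_structure):
--     # Two-phase: collect delimiter positions once, then pair up boundaries.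
--     cuts = [i for i, c in enumerate(secondary_structure) if '=' in c]
--     starts = [0] + [c + 1 for c in cuts]
--     ends = cuts + [len(secondary_structure)]
--     chain = iter(string.ascii_uppercase)
--     slices = {}
--     for s, e in zip(starts, ends):
--         slices[next(chain)] = (s, e)
--     return slices
-- ===== Notes on version B (the rewrite author's own statement) =====
-- stated objective: alternative
-- what changed: B first collects all delimiter positions in one comprehension, then forms boundary pairs from the cuts list and assigns chain letters in a separate pairing loop, instead of A's single fused loop that threads a running 'prev' and emits slices while scanning.
import Mathlib
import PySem

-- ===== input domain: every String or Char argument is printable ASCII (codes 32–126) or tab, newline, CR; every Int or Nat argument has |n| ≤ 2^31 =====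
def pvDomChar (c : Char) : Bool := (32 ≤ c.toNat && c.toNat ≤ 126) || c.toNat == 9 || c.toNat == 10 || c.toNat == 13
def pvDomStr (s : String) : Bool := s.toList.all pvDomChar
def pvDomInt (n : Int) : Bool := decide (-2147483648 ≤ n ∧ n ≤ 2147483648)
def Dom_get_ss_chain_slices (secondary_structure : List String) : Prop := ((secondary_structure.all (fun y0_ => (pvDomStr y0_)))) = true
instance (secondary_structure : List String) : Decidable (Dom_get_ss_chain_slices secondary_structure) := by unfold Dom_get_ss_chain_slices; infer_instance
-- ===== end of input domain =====

-- B collects delimiter positions first and pairs boundaries in a second phase (A fuses both in one loop);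
-- equivalence of the RETURN value on Pre_ (where neither Python raises StopIteration).

-- next(chain) on iter(string.ascii_uppercase): the i-th uppercase letter; the ".getD \"?\"" arm is
-- the StopIteration case (i ≥ 26), which Pre_ excludes.
def pvChainNext (i : Nat) : String :=
  ((["A","B","C","D","E","F","G","H","I","J","K","L","M",
     "N","O","P","Q","R","S","T","U","V","W","X","Y","Z"] : List String)[i]?).getD "?"

-- ===== PORT A =====
def get_ss_chain_slices (secondary_structure : List String) : List (String × Int × Int) :=
  let last : Int := secondary_structure.length
  let st :=
    (PySem.List.enumerate secondary_structure 0).foldl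
      (fun (st : PySem.Dict String (Int × Int) × Int × Nat) p =>
        if PySem.Str.isIn "=" p.2 then
          (st.1.insert (pvChainNext st.2.2) (st.2.1, p.1), p.1 + 1, st.2.2 + 1)
        else st)
      (PySem.Dict.empty, 0, 0)
  (st.1.insert (pvChainNext st.2.2) (st.2.1, last)).items

-- ===== PORT B =====
def get_ss_chain_slices_alt (secondary_structure : List String) : List (String × Int × Int) :=
  let cuts : List Int :=
    ((PySem.List.enumerate secondary_structure 0).filter
      (fun p => PySem.Str.isIn "=" p.2)).map (·.1)
  let starts : List Int := 0 :: cuts.map (· + 1)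
  let ends : List Int := cuts ++ [(secondary_structure.length : Int)]
  ((starts.zip ends).foldl
      (fun (st : PySem.Dict String (Int × Int) × Nat) se =>
        (st.1.insert (pvChainNext st.2) se, st.2 + 1))
      (PySem.Dict.empty, 0)).1.items

-- ===== PRECONDITION & SPEC =====
-- Pre_ excludes inputs with more than 25 '='-containing entries, on which both Pythons raise StopIteration.
def Pre_get_ss_chain_slices (secondary_structure : List String) : Prop :=
  secondary_structure.countP (fun s => PySem.Str.isIn "=" s) ≤ 25
instance (secondary_structure : List String) : Decidable (Pre_get_ss_chain_slices secondary_structure) := by unfold Pre_get_ss_chain_slices; infer_instance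
def pvWitness_get_ss_chain_slices : List String := ["a=", "bb"]
def Spec_get_ss_chain_slices (secondary_structure : List String) (out : List (String × Int × Int)) : Prop := out = get_ss_chain_slices_alt secondary_structure
instance (secondary_structure : List String) (out : List (String × Int × Int)) : Decidable (Spec_get_ss_chain_slices secondary_structure out) := by unfold Spec_get_ss_chain_slices; infer_instance

-- ===== CLAIM (what is proved, stated in full; the proofs are below) =====
def Claim_equal_get_ss_chain_slices : Prop := ∀ (secondary_structure : List String), Dom_get_ss_chain_slices secondary_structure → Pre_get_ss_chain_slices secondary_structure → Spec_get_ss_chain_slices secondary_structure (get_ss_chain_slices secondary_structure)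

-- ===== LEMMAS AND PROOFS =====

-- The (start, end) pairs both programs emit, as one recursive description.
def pvPairs (ss : List String) (i prev last : Int) : List (Int × Int) :=
  match ss with
  | [] => [(prev, last)]
  | x :: xs =>
    if PySem.Str.isIn "=" x then (prev, i) :: pvPairs xs (i + 1) (i + 1) last
    else pvPairs xs (i + 1) prev last

-- Assigning chain letters to a pair list.
def pvAssign (st : PySem.Dict String (Int × Int) × Nat) (ps : List (Int × Int)) :
    PySem.Dict String (Int × Int) × Nat :=
  ps.foldl (fun st se => (st.1.insert (pvChainNext st.2) se, st.2 + 1)) st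

theorem pvA_fold (ss : List String) (i prev last : Int)
    (d : PySem.Dict String (Int × Int)) (ci : Nat) :
    (let st := (PySem.List.enumerate ss i).foldl
        (fun (st : PySem.Dict String (Int × Int) × Int × Nat) p =>
          if PySem.Str.isIn "=" p.2 then
            (st.1.insert (pvChainNext st.2.2) (st.2.1, p.1), p.1 + 1, st.2.2 + 1)
          else st)
        (d, prev, ci)
     (st.1.insert (pvChainNext st.2.2) (st.2.1, last), st.2.2 + 1))
    = pvAssign (d, ci) (pvPairs ss i prev last) := by
  induction ss generalizing i prev d ci with
  | nil => simp [pvPairs, pvAssign, PySem.List.enumerate_nil]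
  | cons x xs ih =>
    rw [PySem.List.enumerate_cons]
    by_cases h : PySem.Str.isIn "=" x
    · simp only [List.foldl_cons, h, if_pos, pvPairs, pvAssign, List.foldl_cons]
      exact ih (i + 1) (i + 1) (d.insert (pvChainNext ci) (prev, i)) (ci + 1)
    · simp only [List.foldl_cons, h, pvPairs, if_false, Bool.false_eq_true]
      exact ih (i + 1) prev d ci

theorem pvB_zip (ss : List String) (i prev last : Int) :
    (prev :: (((PySem.List.enumerate ss i).filter
        (fun p => PySem.Str.isIn "=" p.2)).map (·.1)).map (· + 1)).zip
      ((((PySem.List.enumerate ss i).filter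
        (fun p => PySem.Str.isIn "=" p.2)).map (·.1)) ++ [last])
    = pvPairs ss i prev last := by
  induction ss generalizing i prev with
  | nil => simp [pvPairs, PySem.List.enumerate_nil]
  | cons x xs ih =>
    rw [PySem.List.enumerate_cons]
    by_cases h : PySem.Str.isIn "=" x
    · simp only [List.filter_cons, h, if_pos, List.map_cons, List.cons_append,
        List.zip_cons_cons, pvPairs]
      exact congrArg _ (ih (i + 1) (i + 1))
    · simp only [List.filter_cons, h, Bool.false_eq_true, if_false, pvPairs]
      exact ih (i + 1) prev

-- ===== VERDICT (by name: the statement is the Claim_ definition above) =====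
theorem get_ss_chain_slices_spec : Claim_equal_get_ss_chain_slices := by
  intro ss _ _
  unfold Spec_get_ss_chain_slices get_ss_chain_slices get_ss_chain_slices_alt
  have hB := pvB_zip ss 0 0 (ss.length : Int)
  simp only [hB]
  have hA := pvA_fold ss 0 0 (ss.length : Int) PySem.Dict.empty 0
  have : ((PySem.List.enumerate ss 0).foldl
        (fun (st : PySem.Dict String (Int × Int) × Int × Nat) p =>
          if PySem.Str.isIn "=" p.2 then
            (st.1.insert (pvChainNext st.2.2) (st.2.1, p.1), p.1 + 1, st.2.2 + 1)
          else st)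
        (PySem.Dict.empty, 0, 0)).1.insert
      (pvChainNext ((PySem.List.enumerate ss 0).foldl
        (fun (st : PySem.Dict String (Int × Int) × Int × Nat) p =>
          if PySem.Str.isIn "=" p.2 then
            (st.1.insert (pvChainNext st.2.2) (st.2.1, p.1), p.1 + 1, st.2.2 + 1)
          else st)
        (PySem.Dict.empty, 0, 0)).2.2)
      (((PySem.List.enumerate ss 0).foldl
        (fun (st : PySem.Dict String (Int × Int) × Int × Nat) p =>
          if PySem.Str.isIn "=" p.2 then
            (st.1.insert (pvChainNext st.2.2) (st.2.1, p.1), p.1 + 1, st.2.2 + 1)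
          else st)
        (PySem.Dict.empty, 0, 0)).2.1, (ss.length : Int))
      = (pvAssign (PySem.Dict.empty, 0) (pvPairs ss 0 0 (ss.length : Int))).1 :=
    congrArg Prod.fst hA
  rw [this]
  rfl
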